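-- pv_equiv track=rewrite | github.com/liuhz0926/algorithm_practicing_progress | Two_Pointers/1375/1375_2pts_0114.py | kDistinctCharacters
-- ===== SOURCE A (Python) =====
-- def kDistinctCharacters(s, k):
--     if not s:
--         return 0
--
--     char_to_count = {}
--     left = 0
--     num_substring = 0
--
--     for right in range(len(s)):
--         char_to_count[s[right]] = char_to_count.get(s[right], 0) + 1
--
--         while left <= right and len(char_to_count) >= k:
--             num_substring += len(s) - right
--
--             # 挪left
--             char_to_count[s[left]] -= 1
--             if char_to_count[s[left]] == 0:
--                 # 0了删除该点
--                 del char_to_count[s[left]]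
--             left += 1
--
--     return num_substring
-- ===== SOURCE B (Python) =====
-- def kDistinctCharacters(s, k):
--     # Complement: answer = total substrings - substrings with at most k-1 distinct.
--     # The at-most window is kept as an explicit list of characters (no dict, no indices).
--     n = len(s)
--     window = []
--     at_most = 0
--     for c in s:
--         window.append(c)
--         while window and len(set(window)) > k - 1:
--             window.pop(0)
--         at_most += len(window)
--     return n * (n + 1) // 2 - at_most
-- ===== Notes on version B (the rewrite author's own statement) =====
-- stated objective: alternative
-- what changed: B counts by complement: total substrings n*(n+1)//2 minus substrings with at most k-1 distinct, where the at-most window is an explicit list of characters shrunk from the front with len(set(window)) as the distinct count, instead of A's direct >=k-distinct window over a char-frequency dict with left/right index pointers adding len(s)-right per shrink.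
import Mathlib
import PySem

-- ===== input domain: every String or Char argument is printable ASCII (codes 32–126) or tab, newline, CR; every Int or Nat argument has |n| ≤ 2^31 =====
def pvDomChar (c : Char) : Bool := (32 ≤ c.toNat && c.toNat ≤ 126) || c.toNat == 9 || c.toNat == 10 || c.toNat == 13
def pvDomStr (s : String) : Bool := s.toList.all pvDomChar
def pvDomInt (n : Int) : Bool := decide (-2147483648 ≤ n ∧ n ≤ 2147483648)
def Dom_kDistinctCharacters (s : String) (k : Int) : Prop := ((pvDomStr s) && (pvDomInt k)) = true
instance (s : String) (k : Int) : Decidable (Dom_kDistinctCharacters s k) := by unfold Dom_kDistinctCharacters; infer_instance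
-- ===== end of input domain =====

-- B counts substrings with ≥ k distinct by complement (total − at-most-(k−1)), keeping the window
-- as an explicit character list with len(set(window)) as distinct count, instead of A's
-- frequency-dict window with left/right index pointers; alternative decomposition, same results.


-- ===== PORT A =====
-- inner `while left <= right and len(char_to_count) >= k:` of A (state: dict, left, num_substring)
def pyShrinkA (cs : List Char) (n : Nat) (k : Int) (right : Nat)
    (d : PySem.Dict Char Int) (left : Nat) (num : Int) : PySem.Dict Char Int × Nat × Int :=
  if h : left ≤ right ∧ k ≤ (PySem.Dict.size d : Int) then
    let num' := num + ((n : Int) - (right : Int))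
    let c := cs.getD left ' '   -- s[left]; left ≤ right < n at every call, so in range
    let d' := PySem.Dict.modify d c 0 (· - 1)   -- char_to_count[s[left]] -= 1 (key always present when reached)
    let d'' := if PySem.Dict.getD d' c 0 == 0 then PySem.Dict.erase d' c else d'
    pyShrinkA cs n k right d'' (left + 1) num'
  else (d, left, num)
termination_by right + 1 - left
decreasing_by omega

def pyStepA (cs : List Char) (n : Nat) (k : Int)
    (st : PySem.Dict Char Int × Nat × Int) (right : Nat) : PySem.Dict Char Int × Nat × Int :=
  let c := cs.getD right ' '
  let d := PySem.Dict.insert st.1 c (PySem.Dict.getD st.1 c 0 + 1)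
  pyShrinkA cs n k right d st.2.1 st.2.2

def kDistinctCharacters (s : String) (k : Int) : Int :=
  let cs := s.toList
  if cs = [] then 0
  else
    let n := cs.length
    ((List.range n).foldl (pyStepA cs n k) (PySem.Dict.empty, 0, 0)).2.2

-- ===== PORT B =====
-- inner `while window and len(set(window)) > k - 1:` of B (window.pop(0) = tail)
def pyShrinkB (w : List Char) (k : Int) : List Char :=
  if h : w ≠ [] ∧ k - 1 < PySem.Set.len (PySem.Set.ofList w) then
    pyShrinkB w.tail k
  else w
termination_by w.length
decreasing_by
  have := List.length_pos_iff.mpr h.1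
  simp [List.length_tail]
  omega

-- body of `for c in s:` of B (state: window, at_most)
def pyStepB (k : Int) (st : List Char × Int) (c : Char) : List Char × Int :=
  let w := pyShrinkB (st.1 ++ [c]) k
  (w, st.2 + (w.length : Int))

def kDistinctCharacters_alt (s : String) (k : Int) : Int :=
  let cs := s.toList
  let n := cs.length
  PySem.Int.floordiv ((n : Int) * ((n : Int) + 1)) 2 - (cs.foldl (pyStepB k) ([], 0)).2

-- ===== PRECONDITION & SPEC =====
def Spec_kDistinctCharacters (s : String) (k : Int) (out : Int) : Prop := out = kDistinctCharacters_alt s k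
instance (s : String) (k : Int) (out : Int) : Decidable (Spec_kDistinctCharacters s k out) := by unfold Spec_kDistinctCharacters; infer_instance

-- ===== CLAIM (what is proved, stated in full; the proofs are below) =====
def Claim_equal_kDistinctCharacters : Prop := ∀ (s : String) (k : Int), Dom_kDistinctCharacters s k → Spec_kDistinctCharacters s k (kDistinctCharacters s k)

-- ===== LEMMAS AND PROOFS =====

-- "d is the character counter of the window w": unique keys, counts match, keys = chars of w
def CounterOf (d : PySem.Dict Char Int) (w : List Char) : Prop :=
  d.keys.Nodup ∧ (∀ c, PySem.Dict.getD d c 0 = (w.count c : Int)) ∧ (∀ c, c ∈ d.keys ↔ c ∈ w)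

-- PySem has no erase lemmas; these three facts about it are proved here
theorem get?_erase_self {ν : Type} (d : PySem.Dict Char ν) (c : Char) :
    (PySem.Dict.erase d c).get? c = none := by
  simp only [PySem.Dict.erase, PySem.Dict.get?, Option.map_eq_none_iff, List.find?_eq_none]
  intro p hp
  simp only [List.mem_filter, Bool.not_eq_eq_eq_not, Bool.not_true] at hp
  simp [hp.2]

theorem get?_erase_of_ne {ν : Type} (d : PySem.Dict Char ν) (c c' : Char) (h : c' ≠ c) :
    (PySem.Dict.erase d c).get? c' = d.get? c' := by
  simp only [PySem.Dict.erase, PySem.Dict.get?]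
  congr 1
  induction d.items with
  | nil => rfl
  | cons p t ih =>
    by_cases hp : p.1 = c
    · simp [List.filter_cons, hp, Ne.symm h, ih]
    · by_cases hc' : p.1 = c'
      · simp [List.filter_cons, hp, hc', h]
      · simp [List.filter_cons, hp, hc', ih]

theorem keys_erase {ν : Type} (d : PySem.Dict Char ν) (c : Char) :
    (PySem.Dict.erase d c).keys = d.keys.filter (fun x => !(x == c)) := by
  simp only [PySem.Dict.erase, PySem.Dict.keys]
  induction d.items with
  | nil => rfl
  | cons p t ih =>
    by_cases hp : p.1 = c <;> simp [List.filter_cons, hp, ih]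

-- |counter| = |set(window)|  (the two distinct counts agree)
theorem size_eq_of_counterOf (d : PySem.Dict Char Int) (w : List Char) (h : CounterOf d w) :
    d.size = (PySem.Set.ofList w).length := by
  obtain ⟨hnd, -, hmem⟩ := h
  have hlen : d.keys.length = (PySem.Set.ofList w).length := by
    apply List.Perm.length_eq
    rw [List.perm_ext_iff_of_nodup hnd (PySem.Set.nodup_ofList w)]
    intro c
    rw [hmem, PySem.Set.mem_ofList]
  simpa [PySem.Dict.keys, PySem.Dict.size] using hlen

-- pushing the new right character
theorem counterOf_push (d : PySem.Dict Char Int) (w : List Char) (c : Char) (h : CounterOf d w) :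
    CounterOf (PySem.Dict.insert d c (PySem.Dict.getD d c 0 + 1)) (w ++ [c]) := by
  obtain ⟨hnd, hcnt, hmem⟩ := h
  refine ⟨?_, ?_, ?_⟩
  · by_cases hc : d.contains c = true
    · rw [PySem.Dict.keys_insert_of_contains d _ hc]; exact hnd
    · rw [PySem.Dict.keys_insert_of_not_contains d _ (by simpa using hc)]
      refine List.Nodup.append hnd (List.nodup_singleton c) ?_
      intro x hx hx'
      simp only [List.mem_singleton] at hx'
      rw [hx'] at hx
      exact absurd ((PySem.Dict.contains_iff_mem_keys d c).mpr hx) (by simpa using hc)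
  · intro c'
    rw [PySem.Dict.getD_insert]
    by_cases hc' : c' = c
    · subst hc'; rw [if_pos rfl, hcnt]; simp [List.count_append]
    · rw [if_neg hc', hcnt]
      have h0 : List.count c' [c] = 0 := by simp [List.count_eq_zero, hc']
      simp [List.count_append, h0]
  · intro c'
    rw [PySem.Dict.mem_keys_insert]
    simp [hmem c', or_comm]

-- popping the left character (A's  -=1 / del-at-zero  matches dropping the head of the window)
theorem counterOf_pop (d : PySem.Dict Char Int) (c0 : Char) (w' : List Char)
    (h : CounterOf d (c0 :: w')) :
    CounterOf (if PySem.Dict.getD (PySem.Dict.modify d c0 0 (· - 1)) c0 0 == 0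
               then PySem.Dict.erase (PySem.Dict.modify d c0 0 (· - 1)) c0
               else PySem.Dict.modify d c0 0 (· - 1)) w' := by
  obtain ⟨hnd, hcnt, hmem⟩ := h
  have hc0 : PySem.Dict.getD (PySem.Dict.modify d c0 0 (· - 1)) c0 0 = (w'.count c0 : Int) := by
    rw [PySem.Dict.getD_modify_self, hcnt]
    simp [List.count_cons]
  have hcontains : d.contains c0 = true := by
    rw [PySem.Dict.contains_iff_mem_keys, hmem]; simp
  have hkeysmod : (PySem.Dict.modify d c0 0 (· - 1)).keys = d.keys := by
    simp only [PySem.Dict.modify]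
    exact PySem.Dict.keys_insert_of_contains d _ hcontains
  by_cases hz : w'.count c0 = 0
  · rw [if_pos (by rw [hc0, hz]; rfl)]
    have hc0notmem : c0 ∉ w' := by simpa [List.count_eq_zero] using hz
    refine ⟨?_, ?_, ?_⟩
    · rw [keys_erase, hkeysmod]; exact hnd.filter _
    · intro c'
      by_cases hc' : c' = c0
      · subst hc'
        rw [PySem.Dict.getD_eq_get?_getD, get?_erase_self]
        simp [hz]
      · rw [PySem.Dict.getD_eq_get?_getD, get?_erase_of_ne _ _ _ hc',
            ← PySem.Dict.getD_eq_get?_getD, PySem.Dict.getD_modify_of_ne d 0 (· - 1) hc', hcnt]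
        simp [List.count_cons, Ne.symm hc']
    · intro c'
      rw [keys_erase, hkeysmod]
      simp only [List.mem_filter, hmem]
      by_cases hc' : c' = c0
      · subst hc'; simp [hc0notmem]
      · simp [hc', List.mem_cons]
  · rw [if_neg (by rw [hc0]; simpa using hz)]
    refine ⟨by rw [hkeysmod]; exact hnd, ?_, ?_⟩
    · intro c'
      by_cases hc' : c' = c0
      · subst hc'; exact hc0
      · rw [PySem.Dict.getD_modify_of_ne d 0 (· - 1) hc', hcnt]
        simp [List.count_cons, Ne.symm hc']
    · intro c'
      rw [hkeysmod, hmem]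
      by_cases hc' : c' = c0
      · subst hc'
        simp [List.count_pos_iff.mp (Nat.pos_of_ne_zero hz)]
      · simp [hc', List.mem_cons]

-- the two shrink loops walk in lockstep
theorem shrink_agree (cs : List Char) (k : Int) (right : Nat) (hr : right < cs.length) :
    ∀ (fuel : Nat) (w : List Char) (d : PySem.Dict Char Int) (left : Nat) (num : Int),
      w.length ≤ fuel →
      CounterOf d w →
      w = (cs.take (right + 1)).drop left →
      right + 1 - left = w.length → left ≤ right + 1 →
      CounterOf (pyShrinkA cs cs.length k right d left num).1 (pyShrinkB w k)
      ∧ pyShrinkB w k = (cs.take (right + 1)).drop (pyShrinkA cs cs.length k right d left num).2.1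
      ∧ right + 1 - (pyShrinkA cs cs.length k right d left num).2.1 = (pyShrinkB w k).length
      ∧ (pyShrinkA cs cs.length k right d left num).2.1 ≤ right + 1
      ∧ (pyShrinkA cs cs.length k right d left num).2.2
          = num + ((cs.length : Int) - (right : Int))
                  * ((w.length : Int) - ((pyShrinkB w k).length : Int)) := by
  intro fuel
  induction fuel with
  | zero =>
    intro w d left num hf hco hw hlen hle
    have hwnil : w = [] := List.eq_nil_of_length_eq_zero (by omega)
    subst hwnil
    rw [pyShrinkA, dif_neg (by simp at hlen; omega), pyShrinkB, dif_neg (by simp)]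
    exact ⟨hco, hw, hlen, hle, by ring⟩
  | succ f ih =>
    intro w d left num hf hco hw hlen hle
    have hsz := size_eq_of_counterOf d w hco
    by_cases hg : left ≤ right ∧ k ≤ (PySem.Dict.size d : Int)
    · have hwne : w ≠ [] := by
        intro hnil
        rw [hnil] at hlen
        simp at hlen
        omega
      have hwpos : 0 < w.length := List.length_pos_iff.mpr hwne
      rw [pyShrinkA, dif_pos hg, pyShrinkB,
          dif_pos ⟨hwne, by simp only [PySem.Set.len]; omega⟩]
      -- the head of the window is s[left]
      have hhead : w = cs.getD left ' ' :: w.tail := by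
        have h1 : w.head? = some (cs.getD left ' ') := by
          rw [hw, List.head?_drop, List.getElem?_take_of_lt (by omega),
              List.getElem?_eq_getElem (by omega),
              List.getD_eq_getElem cs ' ' (by omega)]
        conv_lhs => rw [← List.cons_head_tail hwne]
        rw [List.head?_eq_head hwne] at h1
        rw [Option.some_inj.mp h1]
      have hco' : CounterOf d (cs.getD left ' ' :: w.tail) := by rw [← hhead]; exact hco
      have htl : w.tail = (cs.take (right + 1)).drop (left + 1) := by
        rw [hw, List.tail_drop]
      have htlen : right + 1 - (left + 1) = w.tail.length := by
        rw [List.length_tail]; omega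
      have hrec := ih w.tail _ (left + 1) (num + ((cs.length : Int) - (right : Int)))
        (by rw [List.length_tail]; omega) (counterOf_pop d _ w.tail hco') htl htlen (by omega)
      refine ⟨hrec.1, hrec.2.1, hrec.2.2.1, hrec.2.2.2.1, ?_⟩
      rw [hrec.2.2.2.2]
      have hlt : (w.tail.length : Int) = (w.length : Int) - 1 := by
        rw [List.length_tail]; omega
      rw [hlt]
      ring
    · rw [pyShrinkA, dif_neg hg, pyShrinkB, dif_neg ?_]
      · exact ⟨hco, hw, hlen, hle, by ring⟩
      · rintro ⟨hne, hlt⟩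
        simp only [PySem.Set.len] at hlt
        have hwpos : 0 < w.length := List.length_pos_iff.mpr hne
        rw [not_and_or] at hg
        rcases hg with hg | hg <;> omega

-- Gauss triangle for the final total
def pvT : Nat → Int
  | 0 => 0
  | r + 1 => pvT r + (r + 1)

theorem pvT_two_mul (n : Nat) : 2 * pvT n = (n : Int) * ((n : Int) + 1) := by
  induction n with
  | zero => simp [pvT]
  | succ r ih => rw [pvT]; push_cast; push_cast at ih; ring_nf; ring_nf at ih; omega

theorem floordiv_eq_pvT (n : Nat) :
    PySem.Int.floordiv ((n : Int) * ((n : Int) + 1)) 2 = pvT n := by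
  rw [← pvT_two_mul n, PySem.Int.floordiv_eq_ediv_of_pos (by omega)]
  omega

-- joint invariant of the two outer loops after r iterations
theorem fold_invariant (cs : List Char) (k : Int) (r : Nat) (hr : r ≤ cs.length) :
    CounterOf ((List.range r).foldl (pyStepA cs cs.length k) (PySem.Dict.empty, 0, 0)).1
      ((cs.take r).foldl (pyStepB k) ([], 0)).1
    ∧ ((cs.take r).foldl (pyStepB k) ([], 0)).1
        = (cs.take r).drop ((List.range r).foldl (pyStepA cs cs.length k) (PySem.Dict.empty, 0, 0)).2.1
    ∧ r - ((List.range r).foldl (pyStepA cs cs.length k) (PySem.Dict.empty, 0, 0)).2.1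
        = ((cs.take r).foldl (pyStepB k) ([], 0)).1.length
    ∧ ((List.range r).foldl (pyStepA cs cs.length k) (PySem.Dict.empty, 0, 0)).2.1 ≤ r
    ∧ ((List.range r).foldl (pyStepA cs cs.length k) (PySem.Dict.empty, 0, 0)).2.2
        + ((cs.take r).foldl (pyStepB k) ([], 0)).2
        - ((cs.length : Int) - (r : Int))
            * (((List.range r).foldl (pyStepA cs cs.length k) (PySem.Dict.empty, 0, 0)).2.1 : Int)
        = pvT r := by
  induction r with
  | zero =>
    refine ⟨⟨by simp [PySem.Dict.keys_empty], ?_, by simp [PySem.Dict.keys_empty]⟩,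
            by simp, by simp, by simp, by simp [pvT]⟩
    intro c
    simp [PySem.Dict.getD_empty]
  | succ r ih =>
    have hrlt : r < cs.length := by omega
    obtain ⟨ih1, ih2, ih3, ih4, ih5⟩ := ih (by omega)
    rw [List.range_succ, List.foldl_append, List.foldl_cons, List.foldl_nil,
        List.take_add_one, List.getElem?_eq_getElem hrlt, Option.toList_some,
        List.foldl_append, List.foldl_cons, List.foldl_nil]
    set stA := (List.range r).foldl (pyStepA cs cs.length k) (PySem.Dict.empty, 0, 0) with hstA
    set stB := (cs.take r).foldl (pyStepB k) (([] : List Char), (0 : Int)) with hstB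
    rw [pyStepA, pyStepB]
    simp only []
    have hc : cs.getD r ' ' = cs[r] := List.getD_eq_getElem cs ' ' hrlt
    rw [hc]
    have hwpush : stB.1 ++ [cs[r]] = (cs.take (r + 1)).drop stA.2.1 := by
      rw [List.take_add_one, List.getElem?_eq_getElem hrlt, Option.toList_some,
          List.drop_append_of_le_length (by simp [List.length_take]; omega), ih2]
    have hlenpush : r + 1 - stA.2.1 = (stB.1 ++ [cs[r]]).length := by
      simp only [List.length_append, List.length_cons, List.length_nil]
      omega
    have hshrink := shrink_agree cs k r hrlt (stB.1 ++ [cs[r]]).length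
      (stB.1 ++ [cs[r]])
      (PySem.Dict.insert stA.1 cs[r] (PySem.Dict.getD stA.1 cs[r] 0 + 1))
      stA.2.1 stA.2.2 (le_refl _)
      (counterOf_push stA.1 stB.1 cs[r] ih1) hwpush hlenpush (by omega)
    obtain ⟨hs1, hs2, hs3, hs4, hs5⟩ := hshrink
    refine ⟨hs1,
      (by rw [hs2, List.take_add_one, List.getElem?_eq_getElem hrlt, Option.toList_some]),
      by omega, by omega, ?_⟩
    rw [hs5, pvT]
    have e1 : ((stB.1 ++ [cs[r]]).length : Int) = (r : Int) - (stA.2.1 : Int) + 1 := by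
      simp only [List.length_append, List.length_cons, List.length_nil]
      push_cast
      omega
    have e2 : (((pyShrinkB (stB.1 ++ [cs[r]]) k).length : Nat) : Int)
        = (r : Int) + 1 - ((pyShrinkA cs cs.length k r
            (PySem.Dict.insert stA.1 cs[r] (PySem.Dict.getD stA.1 cs[r] 0 + 1))
            stA.2.1 stA.2.2).2.1 : Int) := by
      omega
    rw [e1, e2]
    push_cast
    linear_combination ih5

-- ===== VERDICT (by name: the statement is the Claim_ definition above) =====
theorem kDistinctCharacters_spec : Claim_equal_kDistinctCharacters := by
  intro s k _
  unfold Spec_kDistinctCharacters kDistinctCharacters kDistinctCharacters_alt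
  by_cases h : s.toList = []
  · simp [h, PySem.Int.floordiv]
  · rw [if_neg h]
    simp only []
    have hinv := fold_invariant s.toList k s.toList.length (le_refl _)
    rw [floordiv_eq_pvT]
    rw [List.take_length] at hinv
    have hz : ((s.toList.length : Int) - (s.toList.length : Int)) = 0 := by ring
    rw [hz, zero_mul, sub_zero] at hinv
    linarith [hinv.2.2.2.2]
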